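-- pv_equiv track=rewrite | github.com/JuanDAT-3/ProyectoMD | BiblioE5.py | minimizar_por_inclusion
-- ===== SOURCE A (Python) =====
-- def minimizar_por_inclusion(lista):
--     """
--     Versión OPTIMIZADA: Ordena por tamaño para acelerar la poda.
--     Si A es subconjunto de B, eliminamos B (porque A es más pequeño y suficiente).
--     """
--     if not lista: return []
--
--     # 1. Convertimos a sets para velocidad
--     # Convertimos cada elemento a set para poder usar operaciones de conjuntos
--     sets = [set(x) for x in lista]
--
--     # 2. ORDENAR por tamaño (Clave para la optimización)
--     # Es mucho más probable que un conjunto pequeño elimine a uno grande.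
--     sets.sort(key=len)
--
--     keep = [True] * len(sets)
--
--     # 3. Comparación dirigida
--     for i in range(len(sets)):
--         if not keep[i]: continue
--
--         # Solo comparamos contra los que siguen (que son igual o más grandes)
--         for j in range(i + 1, len(sets)):
--             if keep[j]:
--                 # Si el pequeño (i) es subconjunto del grande (j), el grande sobra.
--                 if sets[i].issubset(sets[j]):
--                     keep[j] = False
--
--     # 4. Reconstruir resultado
--     res = []
--     for i, k in enumerate(keep):
--         if k:
--             res.append(sorted(list(sets[i])))
--
--     return res
-- ===== SOURCE B (Python) =====
-- def minimizar_por_inclusion(lista):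
--     """Order-free characterization: after the size sort, deduplicate by set
--     equality (first occurrences) and keep exactly the distinct sets that have
--     no proper subset among the distinct sets; no keep-mask, no elimination."""
--     if not lista:
--         return []
--     sets = sorted((set(x) for x in lista), key=len)
--     distinct = []
--     for s in sets:
--         if all(not (s == t) for t in distinct):
--             distinct.append(s)
--     return [sorted(s) for s in distinct if not any(t < s for t in distinct)]
-- ===== Notes on version B (the rewrite author's own statement) =====
-- stated objective: alternative
-- what changed: Replaces A's boolean keep-mask with directed forward elimination (each kept set marks its later supersets) by an order-free characterization: after the size sort, deduplicate by set equality and keep exactly the distinct sets that have no proper subset among the distinct sets, tested independently against the whole collection.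
import Mathlib
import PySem

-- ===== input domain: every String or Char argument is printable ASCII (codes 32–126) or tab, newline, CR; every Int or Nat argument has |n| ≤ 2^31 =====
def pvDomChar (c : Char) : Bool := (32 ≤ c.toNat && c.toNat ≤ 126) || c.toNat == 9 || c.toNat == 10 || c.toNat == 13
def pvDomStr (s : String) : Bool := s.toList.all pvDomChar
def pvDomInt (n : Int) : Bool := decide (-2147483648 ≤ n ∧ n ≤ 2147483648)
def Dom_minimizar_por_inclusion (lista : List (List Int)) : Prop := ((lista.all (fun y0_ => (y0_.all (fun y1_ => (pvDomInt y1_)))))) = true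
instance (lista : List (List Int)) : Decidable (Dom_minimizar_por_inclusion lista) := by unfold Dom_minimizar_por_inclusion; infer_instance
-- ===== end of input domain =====

-- B replaces A's keep-mask with directed forward elimination by an order-free
-- characterization: dedup by set equality after the size sort, then keep exactly the
-- distinct sets with no proper subset among the distinct sets (objective: alternative).


-- ===== PORT A =====
def minimizar_por_inclusion (lista : List (List Int)) : List (List Int) :=
  if lista = [] then []
  else
    let sets0 : List (PySem.Set Int) := lista.map (fun x => PySem.Set.ofList x)
    let sets := PySem.List.sorted sets0 (fun s => PySem.Set.len s) false
    let n := sets.length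
    let keep :=
      (List.range n).foldl (fun keep i =>
        if keep.getD i false = false then keep
        else
          (List.range' (i+1) (n - (i+1))).foldl (fun keep j =>
            if keep.getD j false then
              if PySem.Set.issubset (sets.getD i PySem.Set.empty) (sets.getD j PySem.Set.empty)
              then keep.set j false else keep
            else keep) keep)
        (List.replicate n true)
    (PySem.List.enumerate keep).foldl (fun res p =>
      if p.2 then
        res ++ [PySem.List.sorted (PySem.List.pyGetD sets p.1 PySem.Set.empty) (fun v => v) false]
      else res) []

-- ===== PORT B =====
def minimizar_por_inclusion_alt (lista : List (List Int)) : List (List Int) :=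
  if lista = [] then []
  else
    let sets := PySem.List.sorted (lista.map (fun x => PySem.Set.ofList x))
                  (fun s => PySem.Set.len s) false
    let distinct := sets.foldl (fun acc s =>
      if acc.all (fun t => !(PySem.Set.equal s t)) then acc ++ [s] else acc) []
    (distinct.filter (fun s =>
        !(distinct.any (fun t => PySem.Set.issubset t s && !(PySem.Set.equal t s))))).map
      (fun s => PySem.List.sorted s (fun v => v) false)

-- ===== PRECONDITION & SPEC =====
def Spec_minimizar_por_inclusion (lista : List (List Int)) (out : List (List Int)) : Prop := out = minimizar_por_inclusion_alt lista
instance (lista : List (List Int)) (out : List (List Int)) : Decidable (Spec_minimizar_por_inclusion lista out) := by unfold Spec_minimizar_por_inclusion; infer_instance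

-- ===== CLAIM (what is proved, stated in full; the proofs are below) =====
def Claim_equal_minimizar_por_inclusion : Prop := ∀ (lista : List (List Int)), Dom_minimizar_por_inclusion lista → Spec_minimizar_por_inclusion lista (minimizar_por_inclusion lista)

-- ===== LEMMAS AND PROOFS =====

-- `pvSub ss i j` : the set at index i is a subset of the set at index j.
def pvSub (ss : List (PySem.Set Int)) (i j : Nat) : Bool :=
  PySem.Set.issubset (ss.getD i PySem.Set.empty) (ss.getD j PySem.Set.empty)

-- `pvF ss j` : the set at index j survives (no earlier surviving set is a subset of it).
def pvF (ss : List (PySem.Set Int)) : Nat → Bool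
  | j => (List.range j).attach.all (fun i => !(pvF ss i.1 && pvSub ss i.1 j))
termination_by j => j
decreasing_by exact List.mem_range.mp i.2

theorem pvF_eq (ss : List (PySem.Set Int)) (j : Nat) :
    pvF ss j = (List.range j).all (fun i => !(pvF ss i && pvSub ss i j)) := by
  rw [pvF]; simp only [List.all_subtype, List.unattach_attach]

-- keep-value after the first m outer iterations of A's elimination loop
def pvG (ss : List (PySem.Set Int)) (m j : Nat) : Bool :=
  (List.range (min m j)).all (fun i => !(pvF ss i && pvSub ss i j))

-- A's outer loop, stopped after m iterations (proof helper; at m = ss.length it is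
-- definitionally the keep-mask the port computes)
def pvOuterFold (ss : List (PySem.Set Int)) (m : Nat) : List Bool :=
  (List.range m).foldl (fun keep i =>
    if keep.getD i false = false then keep
    else
      (List.range' (i+1) (ss.length - (i+1))).foldl (fun kp j =>
        if kp.getD j false then
          if PySem.Set.issubset (ss.getD i PySem.Set.empty) (ss.getD j PySem.Set.empty)
          then kp.set j false else kp
        else kp) keep)
    (List.replicate ss.length true)

theorem pv_inner (p : Nat → Bool) :
    ∀ (k a : Nat) (keep : List Bool),
      (((List.range' a k).foldl (fun kp j =>
          if kp.getD j false then (if p j then kp.set j false else kp) else kp) keep).length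
        = keep.length)
      ∧ ∀ j : Nat,
        ((List.range' a k).foldl (fun kp j =>
          if kp.getD j false then (if p j then kp.set j false else kp) else kp) keep).getD j false
        = if a ≤ j ∧ j < a + k then keep.getD j false && !(p j) else keep.getD j false := by
  intro k
  induction k with
  | zero =>
    intro a keep
    refine ⟨rfl, fun j => ?_⟩
    rw [if_neg (by omega)]
    rfl
  | succ k ih =>
    intro a keep
    rw [List.range'_succ, List.foldl_cons]
    have hlen1 : (if keep.getD a false then (if p a then keep.set a false else keep) else keep).length
        = keep.length := by split_ifs <;> simp
    have hval1 : ∀ j, (if keep.getD a false then (if p a then keep.set a false else keep) else keep).getD j false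
        = if j = a then keep.getD a false && !(p a) else keep.getD j false := by
      intro j
      by_cases hj : j = a
      · subst hj
        rw [if_pos rfl]
        cases hga : keep.getD j false with
        | false =>
          rw [List.getD_eq_getElem?_getD] at hga
          simp [hga]
        | true =>
          have hlt : j < keep.length := by
            by_contra hge
            rw [List.getD_eq_getElem?_getD, List.getElem?_eq_none (by omega)] at hga
            simp at hga
          rw [List.getD_eq_getElem?_getD] at hga
          cases hpa : p j with
          | true => simp [List.getD_eq_getElem?_getD, hlt]
          | false => simp [hga]
      · rw [if_neg hj]
        split_ifs with h1 h2
        · rw [List.getD_eq_getElem?_getD, List.getD_eq_getElem?_getD,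
            List.getElem?_set_ne (by omega)]
        · rfl
        · rfl
    obtain ⟨ihlen, ihval⟩ := ih (a+1)
      (if keep.getD a false then (if p a then keep.set a false else keep) else keep)
    refine ⟨by rw [ihlen, hlen1], fun j => ?_⟩
    rw [ihval j]
    by_cases h1 : a+1 ≤ j ∧ j < a+1+k
    · rw [if_pos h1, hval1 j, if_neg (by omega), if_pos (by omega)]
    · rw [if_neg h1, hval1 j]
      by_cases hj : j = a
      · subst hj; rw [if_pos rfl, if_pos (by omega)]
      · rw [if_neg hj, if_neg (by omega)]

theorem pv_outer (ss : List (PySem.Set Int)) :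
    ∀ m, m ≤ ss.length →
      (pvOuterFold ss m).length = ss.length
      ∧ ∀ j, j < ss.length → (pvOuterFold ss m).getD j false = pvG ss m j := by
  intro m
  induction m with
  | zero =>
    intro _
    refine ⟨by simp [pvOuterFold], fun j hj => ?_⟩
    rw [pvOuterFold]
    simp only [List.range_zero, List.foldl_nil]
    rw [List.getD_eq_getElem?_getD, List.getElem?_replicate, if_pos hj]
    simp [pvG]
  | succ m ih =>
    intro hm
    obtain ⟨ihl, ihv⟩ := ih (by omega)
    have hm' : m < ss.length := by omega
    have hstep : pvOuterFold ss (m+1)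
        = (if (pvOuterFold ss m).getD m false = false then pvOuterFold ss m
           else
             (List.range' (m+1) (ss.length - (m+1))).foldl (fun kp j =>
               if kp.getD j false then
                 if PySem.Set.issubset (ss.getD m PySem.Set.empty) (ss.getD j PySem.Set.empty)
                 then kp.set j false else kp
               else kp) (pvOuterFold ss m)) := by
      rw [pvOuterFold, List.range_succ, List.foldl_append, List.foldl_cons, List.foldl_nil]
      rfl
    have hgm : (pvOuterFold ss m).getD m false = pvF ss m := by
      rw [ihv m hm', pvG, Nat.min_self, ← pvF_eq]
    cases hF : pvF ss m with
    | false =>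
      rw [hstep, hgm, hF, if_pos rfl]
      refine ⟨ihl, fun j hj => ?_⟩
      rw [ihv j hj, pvG, pvG]
      by_cases hjm : j ≤ m
      · rw [show min (m+1) j = min m j from by omega]
      · rw [show min m j = m from by omega, show min (m+1) j = m+1 from by omega,
          List.range_succ, List.all_append]
        simp [hF]
    | true =>
      rw [hstep, hgm, hF, if_neg (by simp)]
      obtain ⟨hl2, hv2⟩ := pv_inner
        (fun j => PySem.Set.issubset (ss.getD m PySem.Set.empty) (ss.getD j PySem.Set.empty))
        (ss.length - (m+1)) (m+1) (pvOuterFold ss m)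
      refine ⟨by rw [hl2, ihl], fun j hj => ?_⟩
      rw [hv2 j, ihv j hj, pvG, pvG]
      by_cases hjm : j ≤ m
      · rw [if_neg (by omega), show min (m+1) j = min m j from by omega]
      · rw [if_pos (by omega), show min m j = m from by omega,
          show min (m+1) j = m+1 from by omega, List.range_succ, List.all_append]
        simp [hF, pvSub]

theorem pv_enum (n : Nat) (f : Nat → Bool) :
    PySem.List.enumerate ((List.range n).map f) 0
      = (List.range n).map (fun i => (Int.ofNat i, f i)) := by
  apply List.ext_getElem
  · simp [PySem.List.length_enumerate]
  · intro k h1 h2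
    rw [PySem.List.getElem_enumerate]
    simp

theorem pvA_recon (ss : List (PySem.Set Int)) (keep : List Bool)
    (hlen : keep.length = ss.length)
    (hval : ∀ j, j < ss.length → keep.getD j false = pvF ss j) :
    (PySem.List.enumerate keep).foldl (fun res p =>
        if p.2 then
          res ++ [PySem.List.sorted (PySem.List.pyGetD ss p.1 PySem.Set.empty) (fun v => v) false]
        else res) []
    = ((List.range ss.length).filter (pvF ss)).map
        (fun i => PySem.List.sorted (ss.getD i PySem.Set.empty) (fun v => v) false) := by
  have hkeep : keep = (List.range ss.length).map (pvF ss) := by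
    apply List.ext_getElem
    · simp [hlen]
    · intro j h1 h2
      rw [← List.getD_eq_getElem (d := false), hval j (by omega)]
      simp
  rw [hkeep, pv_enum,
    PySem.List.foldl_append_if (p := fun q : Int × Bool => q.2)
      (f := fun q : Int × Bool =>
        PySem.List.sorted (PySem.List.pyGetD ss q.1 PySem.Set.empty) (fun v => v) false),
    List.filter_map, List.map_map]
  simp [Function.comp_def, PySem.List.pyGetD_natCast]

theorem pvB_fold (ss : List (PySem.Set Int)) :
    ∀ m, m ≤ ss.length →
      ((ss.take m).foldl (fun acc s =>
          if acc.any (fun t => PySem.Set.issubset t s) then acc else acc ++ [s]) [])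
      = ((List.range m).filter (pvF ss)).map (fun i => ss.getD i PySem.Set.empty) := by
  intro m
  induction m with
  | zero => intro _; simp
  | succ m ih =>
    intro hm
    have hm' : m < ss.length := by omega
    rw [List.take_add_one, List.getElem?_eq_getElem hm', Option.toList_some, List.foldl_append,
      ih (by omega), List.foldl_cons, List.foldl_nil]
    have hany :
        (((List.range m).filter (pvF ss)).map (fun i => ss.getD i PySem.Set.empty)).any
          (fun t => PySem.Set.issubset t ss[m]) = !(pvF ss m) := by
      have hm2 : ss[m] = ss.getD m PySem.Set.empty :=
        (List.getD_eq_getElem (d := PySem.Set.empty) _ hm').symm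
      rw [hm2, List.any_map, List.any_filter, pvF_eq, List.all_eq_not_any_not, Bool.not_not]
      simp [pvSub]
    rw [hany, List.range_succ, List.filter_append, List.map_append]
    cases hF : pvF ss m with
    | true =>
      have hm2 : ss[m] = ss.getD m PySem.Set.empty :=
        (List.getD_eq_getElem (d := PySem.Set.empty) _ hm').symm
      simp [hF, hm2]
    | false =>
      simp [hF]

theorem pv_main (ss : List (PySem.Set Int)) :
    (PySem.List.enumerate (pvOuterFold ss ss.length)).foldl (fun res p =>
        if p.2 then
          res ++ [PySem.List.sorted (PySem.List.pyGetD ss p.1 PySem.Set.empty) (fun v => v) false]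
        else res) []
    = (ss.foldl (fun acc s =>
          if acc.any (fun t => PySem.Set.issubset t s) then acc else acc ++ [s]) []).map
        (fun s => PySem.List.sorted s (fun v => v) false) := by
  obtain ⟨hl, hv⟩ := pv_outer ss ss.length le_rfl
  rw [pvA_recon ss _ hl (fun j hj => by
    rw [hv j hj, pvG, Nat.min_eq_right hj.le, ← pvF_eq])]
  have hb := pvB_fold ss ss.length le_rfl
  rw [List.take_length] at hb
  rw [hb, List.map_map]
  rfl

-- ---------- bridge from the incremental fold to B's dedup + global-minimality form ----------

-- proper subset of sets (Python's  t < s  on sets)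
def pvPsub (t s : PySem.Set Int) : Bool :=
  PySem.Set.issubset t s && !(PySem.Set.equal t s)

-- A's incremental fold over a prefix
def pvIncr (pre : List (PySem.Set Int)) : List (PySem.Set Int) :=
  pre.foldl (fun acc s =>
    if acc.any (fun t => PySem.Set.issubset t s) then acc else acc ++ [s]) []

-- intermediate fold: skip sets with a proper subset anywhere in ss, dedup the rest
def pvDd (ss pre : List (PySem.Set Int)) : List (PySem.Set Int) :=
  pre.foldl (fun acc s =>
    if ss.any (fun t => pvPsub t s) then acc
    else if acc.any (fun t => PySem.Set.equal s t) then acc else acc ++ [s]) []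

-- B's dedup fold over a prefix
def pvDedup (pre : List (PySem.Set Int)) : List (PySem.Set Int) :=
  pre.foldl (fun acc s =>
    if acc.any (fun t => PySem.Set.equal s t) then acc else acc ++ [s]) []

theorem pv_equal_mem (a b : PySem.Set Int) (h : PySem.Set.equal a b = true) :
    ∀ x : Int, x ∈ a ↔ x ∈ b := by
  rw [PySem.Set.equal, Bool.and_eq_true, PySem.Set.issubset_iff, PySem.Set.issubset_iff] at h
  exact fun x => ⟨fun hx => h.1 x hx, fun hx => h.2 x hx⟩

theorem pv_sub_of_mem_iff (a b : PySem.Set Int) (h : ∀ x : Int, (x ∈ a ↔ x ∈ b)) :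
    ∀ t : PySem.Set Int,
      (PySem.Set.issubset t a = PySem.Set.issubset t b)
      ∧ (PySem.Set.issubset a t = PySem.Set.issubset b t)
      ∧ (PySem.Set.equal t a = PySem.Set.equal t b)
      ∧ (PySem.Set.equal a t = PySem.Set.equal b t) := by
  intro t
  have h1 : PySem.Set.issubset t a = PySem.Set.issubset t b := by
    rw [Bool.eq_iff_iff, PySem.Set.issubset_iff, PySem.Set.issubset_iff]
    exact ⟨fun hs x hx => (h x).mp (hs x hx), fun hs x hx => (h x).mpr (hs x hx)⟩
  have h2 : PySem.Set.issubset a t = PySem.Set.issubset b t := by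
    rw [Bool.eq_iff_iff, PySem.Set.issubset_iff, PySem.Set.issubset_iff]
    exact ⟨fun hs x hx => hs x ((h x).mpr hx), fun hs x hx => hs x ((h x).mp hx)⟩
  refine ⟨h1, h2, ?_, ?_⟩
  · rw [PySem.Set.equal, PySem.Set.equal, h1, h2]
  · rw [PySem.Set.equal, PySem.Set.equal, h1, h2]

theorem pv_equal_symm (a b : PySem.Set Int) :
    PySem.Set.equal a b = PySem.Set.equal b a := by
  rw [PySem.Set.equal, PySem.Set.equal, Bool.and_comm]

theorem pv_equal_refl (a : PySem.Set Int) : PySem.Set.equal a a = true := by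
  rw [PySem.Set.equal, Bool.and_eq_true]
  exact ⟨(PySem.Set.issubset_iff a a).mpr (fun x hx => hx),
    (PySem.Set.issubset_iff a a).mpr (fun x hx => hx)⟩

theorem pv_sub_trans (a b c : PySem.Set Int)
    (h1 : PySem.Set.issubset a b = true) (h2 : PySem.Set.issubset b c = true) :
    PySem.Set.issubset a c = true := by
  rw [PySem.Set.issubset_iff] at *
  exact fun x hx => h2 x (h1 x hx)

-- any fold whose step keeps or appends the element only produces members of acc ++ l
theorem pv_fold_mem (g : List (PySem.Set Int) → PySem.Set Int → List (PySem.Set Int))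
    (hg : ∀ a s, g a s = a ∨ g a s = a ++ [s]) :
    ∀ (l acc : List (PySem.Set Int)) (x), x ∈ l.foldl g acc → x ∈ acc ∨ x ∈ l := by
  intro l
  induction l with
  | nil => intro acc x hx; exact Or.inl hx
  | cons s t ih =>
    intro acc x hx
    rw [List.foldl_cons] at hx
    rcases ih (g acc s) x hx with h | h
    · rcases hg acc s with he | he
      · rw [he] at h; exact Or.inl h
      · rw [he, List.mem_append] at h
        rcases h with h | h
        · exact Or.inl h
        · simp at h; subst h; exact Or.inr (by simp)
    · exact Or.inr (List.mem_cons_of_mem _ h)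

theorem pvIncr_mem (pre : List (PySem.Set Int)) (x : PySem.Set Int)
    (hx : x ∈ pvIncr pre) : x ∈ pre := by
  rcases pv_fold_mem _ (fun a s => by split_ifs <;> simp) pre [] x hx with h | h
  · simp at h
  · exact h

theorem pvDedup_mem (pre : List (PySem.Set Int)) (x : PySem.Set Int)
    (hx : x ∈ pvDedup pre) : x ∈ pre := by
  rcases pv_fold_mem _ (fun a s => by split_ifs <;> simp) pre [] x hx with h | h
  · simp at h
  · exact h

theorem pvDd_mem (ss pre : List (PySem.Set Int)) (x : PySem.Set Int)
    (hx : x ∈ pvDd ss pre) : x ∈ pre := by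
  rcases pv_fold_mem _ (fun a s => by split_ifs <;> simp) pre [] x hx with h | h
  · simp at h
  · exact h

-- LemA: subsets present among the kept sets are exactly subsets present in the prefix
theorem pvA_any (pre : List (PySem.Set Int)) (s : PySem.Set Int) :
    (pvIncr pre).any (fun t => PySem.Set.issubset t s)
      = pre.any (fun t => PySem.Set.issubset t s) := by
  induction pre using List.reverseRecOn with
  | nil => rfl
  | append_singleton pre' u ih =>
    have hsnoc : pvIncr (pre' ++ [u])
        = if (pvIncr pre').any (fun t => PySem.Set.issubset t u) then pvIncr pre'
          else pvIncr pre' ++ [u] := by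
      rw [pvIncr, List.foldl_append, List.foldl_cons, List.foldl_nil]; rfl
    rw [hsnoc]
    cases hc : (pvIncr pre').any (fun t => PySem.Set.issubset t u) with
    | false =>
      rw [if_neg (by simp), List.any_append, List.any_append, ih]
    | true =>
      rw [if_pos rfl, List.any_append, ih]
      cases hu : PySem.Set.issubset u s with
      | false => simp [hu]
      | true =>
        rw [List.any_eq_true] at hc
        obtain ⟨t, ht, hts⟩ := hc
        have : pre'.any (fun t => PySem.Set.issubset t s) = true := by
          rw [List.any_eq_true]
          exact ⟨t, pvIncr_mem pre' t ht, pv_sub_trans t u s hts hu⟩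
        simp [this]

-- LemB: a set equal to s already seen in the prefix leaves a representative in pvDd,
-- provided s has no proper subset anywhere in ss
theorem pvB_rep (ss : List (PySem.Set Int)) (s : PySem.Set Int)
    (hP : ss.any (fun t => pvPsub t s) = false) :
    ∀ pre, pre.any (fun t => PySem.Set.equal t s) = true →
      (pvDd ss pre).any (fun t => PySem.Set.equal t s) = true := by
  intro pre
  induction pre using List.reverseRecOn with
  | nil => simp
  | append_singleton pre' x ih =>
    intro hpre
    have hsnoc : pvDd ss (pre' ++ [x])
        = if ss.any (fun t => pvPsub t x) then pvDd ss pre'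
          else if (pvDd ss pre').any (fun t => PySem.Set.equal x t) then pvDd ss pre'
          else pvDd ss pre' ++ [x] := by
      rw [pvDd, List.foldl_append, List.foldl_cons, List.foldl_nil]; rfl
    rw [List.any_append] at hpre
    by_cases hx : PySem.Set.equal x s = true
    · -- x is equal to s; either it or an earlier equal set is kept
      have hmem := pv_equal_mem x s hx
      have hPx : ss.any (fun t => pvPsub t x) = false := by
        rw [← hP]
        apply PySem.List.any_congr_mem
        intro t _
        rw [pvPsub, pvPsub, (pv_sub_of_mem_iff x s hmem t).1, (pv_sub_of_mem_iff x s hmem t).2.2.1]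
      rw [hsnoc, hPx, if_neg (by simp)]
      cases hc : (pvDd ss pre').any (fun t => PySem.Set.equal x t) with
      | true =>
        rw [if_pos rfl]
        rw [List.any_eq_true] at hc
        obtain ⟨t, ht, hxt⟩ := hc
        rw [List.any_eq_true]
        refine ⟨t, ht, ?_⟩
        rw [pv_equal_symm] at hxt
        rw [← (pv_sub_of_mem_iff x s hmem t).2.2.1]
        exact hxt
      | false =>
        rw [if_neg (by simp), List.any_append]
        simp [hx]
    · -- x is not equal to s, so the earlier occurrence is in pre'
      have hpre' : pre'.any (fun t => PySem.Set.equal t s) = true := by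
        rcases Bool.or_eq_true_iff.mp hpre with h | h
        · exact h
        · simp only [List.any_cons, List.any_nil, Bool.or_false] at h
          exact absurd h hx
      have := ih hpre'
      rw [hsnoc]
      split_ifs with h1 h2
      · exact this
      · exact this
      · rw [List.any_append, this]; simp

-- LemC: after the size sort, a proper subset of the set at a split point lies in the prefix
theorem pvC (ss : List (PySem.Set Int))
    (hpair : ss.Pairwise (fun a b => PySem.Set.len a ≤ PySem.Set.len b))
    (hnd : ∀ u ∈ ss, u.Nodup)
    (pre : List (PySem.Set Int)) (s : PySem.Set Int) (suf : List (PySem.Set Int))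
    (hss : ss = pre ++ s :: suf) :
    ss.any (fun t => pvPsub t s) = pre.any (fun t => pvPsub t s) := by
  subst hss
  rw [List.any_append, List.any_cons]
  have hself : pvPsub s s = false := by
    rw [pvPsub, pv_equal_refl s]
    simp
  have hsuf : suf.any (fun t => pvPsub t s) = false := by
    rw [List.any_eq_false]
    intro u hu
    cases hsub : PySem.Set.issubset u s with
    | false => simp [pvPsub, hsub]
    | true =>
      -- u is at least as long as s and a subset of it, hence equal to it
      have hlen : PySem.Set.len s ≤ PySem.Set.len u := by
        rcases List.pairwise_append.mp hpair with ⟨_, hp2, _⟩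
        rcases List.pairwise_cons.mp hp2 with ⟨hs, _⟩
        exact hs u hu
      have hund : u.Nodup := hnd u (by simp [hu])
      have hsnd : s.Nodup := hnd s (by simp)
      have husub : ∀ x ∈ u, x ∈ s := (PySem.Set.issubset_iff u s).mp hsub
      have hle : u.length ≤ s.length := by
        have h1 : u.toFinset ⊆ s.toFinset := by
          intro y hy; simp at hy ⊢; exact husub y hy
        calc u.length = u.toFinset.card := (List.toFinset_card_of_nodup hund).symm
          _ ≤ s.toFinset.card := Finset.card_le_card h1
          _ ≤ s.length := s.toFinset_card_le
      have hge : s.length ≤ u.length := by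
        rw [PySem.Set.len, PySem.Set.len] at hlen
        omega
      have hssub : ∀ x ∈ s, x ∈ u := by
        intro x hx
        have hus : u.toFinset ⊆ s.toFinset := by
          intro y hy; simp at hy ⊢; exact husub y hy
        have hc : s.toFinset.card ≤ u.toFinset.card := by
          rw [List.toFinset_card_of_nodup hund, List.toFinset_card_of_nodup hsnd]
          omega
        have he := Finset.eq_of_subset_of_card_le hus hc
        have : x ∈ u.toFinset := by rw [he]; simp [hx]
        simpa using this
      have heq : PySem.Set.equal u s = true := by
        rw [PySem.Set.equal, Bool.and_eq_true, PySem.Set.issubset_iff, PySem.Set.issubset_iff]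
        exact ⟨husub, hssub⟩
      rw [pvPsub, heq]
      simp
  rw [hself, hsuf]
  simp

-- Step 1: A's incremental fold equals the skip-dedup fold on every prefix of ss
theorem pvStep1 (ss : List (PySem.Set Int))
    (hpair : ss.Pairwise (fun a b => PySem.Set.len a ≤ PySem.Set.len b))
    (hnd : ∀ u ∈ ss, u.Nodup) :
    ∀ pre, (∀ suf, ss = pre ++ suf → pvIncr pre = pvDd ss pre) := by
  intro pre
  induction pre using List.reverseRecOn with
  | nil => intro suf hss; rfl
  | append_singleton pre' x ih =>
    intro suf hss
    have hss' : ss = pre' ++ (x :: suf) := by rw [hss]; simp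
    have ihe : pvIncr pre' = pvDd ss pre' := ih (x :: suf) hss'
    have hsnocI : pvIncr (pre' ++ [x])
        = if (pvIncr pre').any (fun t => PySem.Set.issubset t x) then pvIncr pre'
          else pvIncr pre' ++ [x] := by
      rw [pvIncr, List.foldl_append, List.foldl_cons, List.foldl_nil]; rfl
    have hsnocD : pvDd ss (pre' ++ [x])
        = if ss.any (fun t => pvPsub t x) then pvDd ss pre'
          else if (pvDd ss pre').any (fun t => PySem.Set.equal x t) then pvDd ss pre'
          else pvDd ss pre' ++ [x] := by
      rw [pvDd, List.foldl_append, List.foldl_cons, List.foldl_nil]; rfl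
    have hP2 : ss.any (fun t => pvPsub t x) = pre'.any (fun t => pvPsub t x) :=
      pvC ss hpair hnd pre' x suf hss'
    -- the elimination test equals "proper subset somewhere, or an equal set already kept"
    have hcond : (pvIncr pre').any (fun t => PySem.Set.issubset t x)
        = (ss.any (fun t => pvPsub t x)
           || (pvDd ss pre').any (fun t => PySem.Set.equal x t)) := by
      rw [pvA_any, Bool.eq_iff_iff, Bool.or_eq_true_iff]
      constructor
      · intro h
        rw [List.any_eq_true] at h
        obtain ⟨u, hu, hux⟩ := h
        by_cases hps : pvPsub u x = true
        · left
          rw [List.any_eq_true]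
          exact ⟨u, by rw [hss']; simp [hu], hps⟩
        · have heq : PySem.Set.equal u x = true := by
            rw [pvPsub, hux] at hps
            simpa using hps
          cases hPP : ss.any (fun t => pvPsub t x) with
          | true => exact Or.inl rfl
          | false =>
            right
            have := pvB_rep ss x hPP pre'
              (by rw [List.any_eq_true]; exact ⟨u, hu, heq⟩)
            rw [List.any_eq_true] at this ⊢
            obtain ⟨t, ht, htx⟩ := this
            exact ⟨t, ht, by rw [pv_equal_symm]; exact htx⟩
      · intro h
        rcases h with h | h
        · rw [hP2, List.any_eq_true] at h
          obtain ⟨u, hu, hux⟩ := h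
          rw [List.any_eq_true]
          exact ⟨u, hu, by rw [pvPsub, Bool.and_eq_true] at hux; exact hux.1⟩
        · rw [List.any_eq_true] at h
          obtain ⟨t, ht, hxt⟩ := h
          rw [List.any_eq_true]
          refine ⟨t, pvDd_mem ss pre' t ht, ?_⟩
          rw [pv_equal_symm, PySem.Set.equal, Bool.and_eq_true] at hxt
          exact hxt.1
    rw [hsnocI, hsnocD, hcond, ihe]
    cases h1 : ss.any (fun t => pvPsub t x) with
    | true => simp
    | false =>
      cases h2 : (pvDd ss pre').any (fun t => PySem.Set.equal x t) with
      | true => simp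
      | false => simp

-- Step 3: the skip-dedup fold is the dedup fold filtered by global minimality
theorem pvStep3 (ss : List (PySem.Set Int)) :
    ∀ pre, pvDd ss pre
      = (pvDedup pre).filter (fun s => !(ss.any (fun t => pvPsub t s))) := by
  intro pre
  induction pre using List.reverseRecOn with
  | nil => rfl
  | append_singleton pre' x ih =>
    have hsnocD : pvDd ss (pre' ++ [x])
        = if ss.any (fun t => pvPsub t x) then pvDd ss pre'
          else if (pvDd ss pre').any (fun t => PySem.Set.equal x t) then pvDd ss pre'
          else pvDd ss pre' ++ [x] := by
      rw [pvDd, List.foldl_append, List.foldl_cons, List.foldl_nil]; rfl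
    have hsnocE : pvDedup (pre' ++ [x])
        = if (pvDedup pre').any (fun t => PySem.Set.equal x t) then pvDedup pre'
          else pvDedup pre' ++ [x] := by
      rw [pvDedup, List.foldl_append, List.foldl_cons, List.foldl_nil]; rfl
    rw [hsnocD, hsnocE]
    cases hPx : ss.any (fun t => pvPsub t x) with
    | true =>
      rw [if_pos rfl, ih]
      cases hc : (pvDedup pre').any (fun t => PySem.Set.equal x t) with
      | true => rw [if_pos rfl]
      | false =>
        rw [if_neg (by simp), List.filter_append]
        have : (List.filter (fun s => !(ss.any (fun t => pvPsub t s))) [x]) = [] := by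
          simp [hPx]
        rw [this, List.append_nil]
    | false =>
      rw [if_neg (by simp)]
      have hCC : (pvDd ss pre').any (fun t => PySem.Set.equal x t)
          = (pvDedup pre').any (fun t => PySem.Set.equal x t) := by
        rw [ih, List.any_filter, Bool.eq_iff_iff, List.any_eq_true, List.any_eq_true]
        constructor
        · rintro ⟨t, ht, hq⟩
          rw [Bool.and_eq_true] at hq
          exact ⟨t, ht, hq.2⟩
        · rintro ⟨t, ht, hq⟩
          refine ⟨t, ht, ?_⟩
          rw [Bool.and_eq_true]
          refine ⟨?_, hq⟩
          have hmem := pv_equal_mem x t hq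
          have hzero : ss.any (fun u => pvPsub u t) = false := by
            rw [← hPx]
            apply PySem.List.any_congr_mem
            intro u _
            rw [pvPsub, pvPsub, (pv_sub_of_mem_iff x t hmem u).1,
              (pv_sub_of_mem_iff x t hmem u).2.2.1]
          simp [hzero]
      rw [hCC]
      cases hc : (pvDedup pre').any (fun t => PySem.Set.equal x t) with
      | true => rw [if_pos rfl, if_pos rfl, ih]
      | false =>
        rw [if_neg (by simp), if_neg (by simp), ih, List.filter_append]
        have : (List.filter (fun s => !(ss.any (fun t => pvPsub t s))) [x]) = [x] := by
          simp [hPx]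
        rw [this]

-- LemD: the distinct sets contain a proper subset of s iff the whole list does
theorem pvD_any (pre : List (PySem.Set Int)) (s : PySem.Set Int) :
    (pvDedup pre).any (fun t => pvPsub t s) = pre.any (fun t => pvPsub t s) := by
  induction pre using List.reverseRecOn with
  | nil => rfl
  | append_singleton pre' x ih =>
    have hsnocE : pvDedup (pre' ++ [x])
        = if (pvDedup pre').any (fun t => PySem.Set.equal x t) then pvDedup pre'
          else pvDedup pre' ++ [x] := by
      rw [pvDedup, List.foldl_append, List.foldl_cons, List.foldl_nil]; rfl
    rw [hsnocE]
    cases hc : (pvDedup pre').any (fun t => PySem.Set.equal x t) with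
    | false =>
      rw [if_neg (by simp), List.any_append, List.any_append, ih]
    | true =>
      rw [if_pos rfl, List.any_append, ih]
      cases hx : pvPsub x s with
      | false => simp [hx]
      | true =>
        rw [List.any_eq_true] at hc
        obtain ⟨t, ht, hxt⟩ := hc
        have hmem := pv_equal_mem x t hxt
        have htps : pvPsub t s = true := by
          rw [← hx, pvPsub, pvPsub, (pv_sub_of_mem_iff x t hmem s).2.1,
            (pv_sub_of_mem_iff x t hmem s).2.2.2]
        have : pre'.any (fun t => pvPsub t s) = true := by
          rw [List.any_eq_true]
          exact ⟨t, pvDedup_mem pre' t ht, htps⟩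
        simp [this]

-- master equality, stated on the sorted list of sets
theorem pv_master (ss : List (PySem.Set Int))
    (hpair : ss.Pairwise (fun a b => PySem.Set.len a ≤ PySem.Set.len b))
    (hnd : ∀ u ∈ ss, u.Nodup) :
    (PySem.List.enumerate (pvOuterFold ss ss.length)).foldl (fun res p =>
        if p.2 then
          res ++ [PySem.List.sorted (PySem.List.pyGetD ss p.1 PySem.Set.empty) (fun v => v) false]
        else res) []
    = ((ss.foldl (fun acc s =>
          if acc.all (fun t => !(PySem.Set.equal s t)) then acc ++ [s] else acc) []).filter
        (fun s => !((ss.foldl (fun acc s =>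
          if acc.all (fun t => !(PySem.Set.equal s t)) then acc ++ [s] else acc) []).any
            (fun t => PySem.Set.issubset t s && !(PySem.Set.equal t s))))).map
        (fun s => PySem.List.sorted s (fun v => v) false) := by
  have hBfold : ss.foldl (fun acc s =>
      if acc.all (fun t => !(PySem.Set.equal s t)) then acc ++ [s] else acc) [] = pvDedup ss := by
    rw [pvDedup]
    apply PySem.List.foldl_congr_mem
    intro acc x _
    rw [List.all_eq_not_any_not]
    simp only [Bool.not_not]
    cases h : acc.any (fun t => PySem.Set.equal x t) <;> simp
  rw [pv_main ss, hBfold]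
  have h1 : ss.foldl (fun acc s =>
      if acc.any (fun t => PySem.Set.issubset t s) then acc else acc ++ [s]) [] = pvIncr ss := rfl
  rw [h1, pvStep1 ss hpair hnd ss [] (by simp), pvStep3 ss]
  congr 1
  apply List.filter_congr
  intro s _
  rw [← pvD_any ss s]
  rfl

-- ===== VERDICT (by name: the statement is the Claim_ definition above) =====
theorem minimizar_por_inclusion_spec : Claim_equal_minimizar_por_inclusion := by
  intro lista _
  unfold Spec_minimizar_por_inclusion minimizar_por_inclusion minimizar_por_inclusion_alt
  by_cases h : lista = []
  · simp [h]
  · rw [if_neg h, if_neg h]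
    have hpair := PySem.List.sorted_pairwise (xs := lista.map fun x => PySem.Set.ofList x)
      (key := fun s => PySem.Set.len s)
    have hnd : ∀ u ∈ PySem.List.sorted (lista.map fun x => PySem.Set.ofList x)
        (fun s => PySem.Set.len s) false, u.Nodup := by
      intro u hu
      rw [PySem.List.mem_sorted, List.mem_map] at hu
      obtain ⟨x, _, hx⟩ := hu
      rw [← hx]
      exact PySem.Set.nodup_ofList x
    exact pv_master _ hpair hnd
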